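-- pv_equiv track=rewrite | github.com/JuanCruzMateos/OrgaDeDatos | Practica/Guia09/src/vigenere.py | create_tables
-- ===== SOURCE A (Python) =====
-- def create_tables(alphabet: list) -> tuple:
--     m = {
--         v: {
--             v: alphabet[i+pos] if i+pos < len(alphabet) else alphabet[i + pos - len(alphabet)] for i, v in enumerate(alphabet)
--         } for pos, v in enumerate(alphabet)
--     }
--
--     n = {
--         v: {
--             v: alphabet[i+pos] if i+pos < len(alphabet) else alphabet[i + pos - len(alphabet)] for i, v in enumerate(alphabet)
--         } for pos, v in enumerate(alphabet)
--     }
--     return m, n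
-- ===== SOURCE B (Python) =====
-- def _table(alphabet):
--     table = {}
--     row = list(alphabet)
--     for key in alphabet:
--         table[key] = dict(zip(alphabet, row))
--         row = row[1:] + row[:1]
--     return table
--
--
-- def create_tables(alphabet: list) -> tuple:
--     return _table(alphabet), _table(alphabet)
-- ===== Notes on version B (the rewrite author's own statement) =====
-- stated objective: alternative
-- what changed: B makes a single pass carrying the current row as loop state and rotating it by one element per iteration (row = row[1:] + row[:1]), pairing it with the alphabet to form each inner dict, instead of A's twice-written nested comprehension that computes every cell independently by wrap-around index arithmetic alphabet[(i+pos) mod n].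
import Mathlib
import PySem

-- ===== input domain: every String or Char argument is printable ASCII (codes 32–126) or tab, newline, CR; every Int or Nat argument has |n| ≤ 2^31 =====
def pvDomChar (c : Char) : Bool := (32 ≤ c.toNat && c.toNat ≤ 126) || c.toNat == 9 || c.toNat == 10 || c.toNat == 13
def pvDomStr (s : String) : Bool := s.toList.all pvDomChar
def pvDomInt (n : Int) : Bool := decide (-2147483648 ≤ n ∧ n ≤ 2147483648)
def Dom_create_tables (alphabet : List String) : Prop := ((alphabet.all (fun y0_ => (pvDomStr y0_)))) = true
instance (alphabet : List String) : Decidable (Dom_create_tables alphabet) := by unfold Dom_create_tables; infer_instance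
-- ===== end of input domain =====

-- B builds the table in one pass that carries the current row as loop state, rotating it by one
-- element per iteration, instead of A's nested comprehension computing each cell by wrap-around
-- index arithmetic (objective: alternative decomposition, same cost).

-- ===== PORT A =====
-- alphabet[i+pos] if i+pos < len(alphabet) else alphabet[i+pos-len(alphabet)]
def pvCellA (alphabet : List String) (i pos : Int) : String :=
  if i + pos < (alphabet.length : Int) then PySem.List.pyGetD alphabet (i + pos) ""
  else PySem.List.pyGetD alphabet (i + pos - (alphabet.length : Int)) ""

-- the inner dict comprehension {v: … for i, v in enumerate(alphabet)} at a fixed pos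
def pvInnerA (alphabet : List String) (pos : Int) : List (String × String) :=
  ((PySem.List.enumerate alphabet).foldl
    (fun d iv => d.insert iv.2 (pvCellA alphabet iv.1 pos)) PySem.Dict.empty).items

def create_tables (alphabet : List String) :
    (List (String × List (String × String))) × (List (String × List (String × String))) :=
  let m := ((PySem.List.enumerate alphabet).foldl
    (fun d pv => d.insert pv.2 (pvInnerA alphabet pv.1)) PySem.Dict.empty).items
  let n := ((PySem.List.enumerate alphabet).foldl
    (fun d pv => d.insert pv.2 (pvInnerA alphabet pv.1)) PySem.Dict.empty).items
  (m, n)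

-- ===== PORT B =====
-- dict(zip(alphabet, row))
def pvInnerB (alphabet row : List String) : List (String × String) :=
  (PySem.Dict.ofList (alphabet.zip row)).items

-- one iteration of the loop body: table[key] = dict(zip(alphabet, row)); row = row[1:] + row[:1]
def pvStepB (alphabet : List String)
    (st : PySem.Dict String (List (String × String)) × List String) (key : String) :
    PySem.Dict String (List (String × String)) × List String :=
  (st.1.insert key (pvInnerB alphabet st.2),
   PySem.List.slice st.2 (some 1) none ++ PySem.List.slice st.2 none (some 1))

-- _table: 'table = {}; row = list(alphabet); for key in alphabet: …; return table'
def pvTableB (alphabet : List String) : List (String × List (String × String)) :=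
  (alphabet.foldl (pvStepB alphabet) (PySem.Dict.empty, alphabet)).1.items

def create_tables_alt (alphabet : List String) :
    (List (String × List (String × String))) × (List (String × List (String × String))) :=
  (pvTableB alphabet, pvTableB alphabet)

-- ===== PRECONDITION & SPEC =====
def Spec_create_tables (alphabet : List String) (out : (List (String × List (String × String))) × (List (String × List (String × String)))) : Prop := out = create_tables_alt alphabet
instance (alphabet : List String) (out : (List (String × List (String × String))) × (List (String × List (String × String)))) : Decidable (Spec_create_tables alphabet out) := by unfold Spec_create_tables; infer_instance

-- ===== CLAIM (what is proved, stated in full; the proofs are below) =====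
def Claim_equal_create_tables : Prop := ∀ (alphabet : List String), Dom_create_tables alphabet → Spec_create_tables alphabet (create_tables alphabet)

-- ===== LEMMAS AND PROOFS =====

-- the inner dict built from the row rotated by p
def pvInnerRot (a : List String) (p : Nat) : List (String × String) :=
  pvInnerB a (a.drop p ++ a.take p)

-- a key/value insertion loop is the pair-insertion loop over the mapped pairs
theorem pvFoldlPairs {α ν : Type} (l : List α) (key : α → String) (val : α → ν) :
    l.foldl (fun d x => d.insert (key x) (val x)) PySem.Dict.empty
      = (l.map (fun x => (key x, val x))).foldl
          (fun d q => d.insert q.1 q.2) PySem.Dict.empty := by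
  rw [List.foldl_map]

-- row[1:] + row[:1] is drop 1 ++ take 1
theorem pvRot1 (r : List String) :
    PySem.List.slice r (some 1) none ++ PySem.List.slice r none (some 1)
      = r.drop 1 ++ r.take 1 := by
  rw [show (1 : Int) = ((1 : Nat) : Int) from rfl,
      PySem.List.slice_from_natCast, PySem.List.slice_to_natCast]

-- rotating the p-th rotation once gives the (p+1)-th rotation
theorem pvRotStep (a : List String) (k : Nat) (hk : k < a.length) :
    (a.drop k ++ a.take k).drop 1 ++ (a.drop k ++ a.take k).take 1
      = a.drop (k + 1) ++ a.take (k + 1) := by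
  rw [List.drop_eq_getElem_cons hk]
  simp only [List.cons_append, List.drop_succ_cons, List.drop_zero,
    List.take_succ_cons, List.take_zero]
  rw [List.take_add_one, List.getElem?_eq_getElem hk]
  simp [List.append_assoc]

-- B's stateful fold, characterised: state (d, rotation k), remaining keys a.drop k
theorem pvFoldB (a : List String) : ∀ (l : List String) (k : Nat), a.drop k = l → k ≤ a.length →
    ∀ (d : PySem.Dict String (List (String × String))),
    (l.foldl (pvStepB a) (d, a.drop k ++ a.take k)).1
      = ((List.range' k (a.length - k)).map (fun p => (a.getD p "", pvInnerRot a p))).foldl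
          (fun d q => d.insert q.1 q.2) d := by
  intro l
  induction l with
  | nil =>
    intro k hl hk d
    have : a.length ≤ k := List.drop_eq_nil_iff.mp hl
    have : a.length - k = 0 := by omega
    rw [this]
    simp
  | cons x xs ih =>
    intro k hl hk d
    have hklt : k < a.length := by
      by_contra h
      rw [List.drop_eq_nil_of_le (by omega)] at hl
      exact List.cons_ne_nil x xs hl.symm
    have hcons : x :: xs = a[k] :: a.drop (k + 1) := by
      rw [← hl]; exact List.drop_eq_getElem_cons hklt
    have hx : x = a[k] := (List.cons_eq_cons.mp hcons).1
    have hxs : xs = a.drop (k + 1) := (List.cons_eq_cons.mp hcons).2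
    rw [List.foldl_cons]
    have hstep : pvStepB a (d, a.drop k ++ a.take k) x
        = (d.insert a[k] (pvInnerRot a k), a.drop (k + 1) ++ a.take (k + 1)) := by
      unfold pvStepB pvInnerRot
      rw [hx, pvRot1, pvRotStep a k hklt]
    rw [hstep, ih (k + 1) hxs.symm (by omega) (d.insert a[k] (pvInnerRot a k))]
    have hm : a.length - k = (a.length - (k + 1)) + 1 := by omega
    rw [hm, List.range'_succ, List.map_cons, List.foldl_cons,
        List.getD_eq_getElem _ _ hklt]

-- A's inner comprehension pairs = zip of alphabet with the rotated row
theorem pvInner_pairs_eq (alphabet : List String) (p : Nat) (hp : p < alphabet.length) :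
    (PySem.List.enumerate alphabet).map (fun iv => (iv.2, pvCellA alphabet iv.1 (p : Int)))
      = alphabet.zip (alphabet.drop p ++ alphabet.take p) := by
  apply List.ext_getElem
  · simp [PySem.List.length_enumerate]
    omega
  · intro i h1 h2
    rw [List.getElem_map, PySem.List.getElem_enumerate, List.getElem_zip]
    have hi : i < alphabet.length := by
      simpa [PySem.List.length_enumerate] using h1
    simp only [zero_add]
    congr 1
    · unfold pvCellA
      rw [List.getElem_append]
      by_cases hlt : i + p < alphabet.length
      · have hc : ((i : Int) + (p : Int) < (alphabet.length : Int)) := by omega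
        rw [if_pos hc, dif_pos (show i < (List.drop p alphabet).length by
              simp only [List.length_drop]; omega)]
        rw [show (i : Int) + (p : Int) = ((i + p : Nat) : Int) by omega,
            PySem.List.pyGetD_natCast,
            List.getD_eq_getElem _ _ (by omega)]
        simp only [List.getElem_drop]
        congr 1
        omega
      · have hc : ¬ ((i : Int) + (p : Int) < (alphabet.length : Int)) := by omega
        rw [if_neg hc, dif_neg (show ¬ i < (List.drop p alphabet).length by
              simp only [List.length_drop]; omega)]
        rw [show (i : Int) + (p : Int) - (alphabet.length : Int) = ((i + p - alphabet.length : Nat) : Int) by omega,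
            PySem.List.pyGetD_natCast,
            List.getD_eq_getElem _ _ (by omega)]
        simp only [List.getElem_take, List.length_drop]
        congr 1
        omega

-- A's inner dict at position p = B's dict(zip(alphabet, rotation p))
theorem pvInner_eq (alphabet : List String) (p : Nat) (hp : p < alphabet.length) :
    pvInnerA alphabet (p : Int) = pvInnerRot alphabet p := by
  unfold pvInnerA pvInnerRot pvInnerB
  congr 1
  rw [pvFoldlPairs (PySem.List.enumerate alphabet) (fun iv => iv.2)
        (fun iv => pvCellA alphabet iv.1 (p : Int)),
      pvInner_pairs_eq alphabet p hp]
  rfl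

-- A's outer fold = B's table
theorem pvTable_eq (alphabet : List String) :
    ((PySem.List.enumerate alphabet).foldl
      (fun d pv => d.insert pv.2 (pvInnerA alphabet pv.1)) PySem.Dict.empty).items
      = pvTableB alphabet := by
  unfold pvTableB
  have hB := pvFoldB alphabet alphabet 0 (by rw [List.drop_zero]) (by omega) PySem.Dict.empty
  simp only [List.drop_zero, List.take_zero, List.append_nil, Nat.sub_zero] at hB
  rw [hB]
  congr 1
  rw [pvFoldlPairs (PySem.List.enumerate alphabet) (fun pv => pv.2)
        (fun pv => pvInnerA alphabet pv.1)]
  congr 1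
  apply List.ext_getElem
  · simp [PySem.List.length_enumerate]
  · intro i h1 h2
    rw [List.getElem_map, List.getElem_map, PySem.List.getElem_enumerate,
        List.getElem_range']
    have hi : i < alphabet.length := by
      simpa [PySem.List.length_enumerate] using h1
    simp only [zero_add, one_mul]
    congr 1
    · rw [List.getD_eq_getElem _ _ hi]
    · exact pvInner_eq alphabet i hi

-- ===== VERDICT (by name: the statement is the Claim_ definition above) =====
theorem create_tables_spec : Claim_equal_create_tables := by
  intro alphabet _
  unfold Spec_create_tables create_tables create_tables_alt
  simp only []
  rw [pvTable_eq]
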